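-- pv_equiv track=rewrite | github.com/Digital-Metabolic-Twin-Centre/autodoc | src/services/doc_services.py | _file_matches_target_folders
-- ===== SOURCE A (Python) =====
-- def _file_matches_target_folders(file_path, target_folders):
--     if not target_folders:
--         return True
--     normalized_path = file_path.strip("/")
--     return any(
--         normalized_path == target_folder or normalized_path.startswith(f"{target_folder}/")
--         for target_folder in target_folders
--     )
-- ===== SOURCE B (Python) =====
-- def _file_matches_target_folders(file_path, target_folders):
--     if not target_folders:
--         return True
--     p = file_path.strip("/")
--     for i, c in enumerate(p):
--         if c == "/" and p[:i] in target_folders: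
--             return True
--     return p in target_folders
-- ===== Notes on version B (the rewrite author's own statement) =====
-- stated objective: alternative
-- what changed: B inverts the search: instead of scanning target_folders and testing equality/startswith per target, it scans the normalized path once and tests each slash-cut prefix (and the whole path) for membership in target_folders.
import Mathlib
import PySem

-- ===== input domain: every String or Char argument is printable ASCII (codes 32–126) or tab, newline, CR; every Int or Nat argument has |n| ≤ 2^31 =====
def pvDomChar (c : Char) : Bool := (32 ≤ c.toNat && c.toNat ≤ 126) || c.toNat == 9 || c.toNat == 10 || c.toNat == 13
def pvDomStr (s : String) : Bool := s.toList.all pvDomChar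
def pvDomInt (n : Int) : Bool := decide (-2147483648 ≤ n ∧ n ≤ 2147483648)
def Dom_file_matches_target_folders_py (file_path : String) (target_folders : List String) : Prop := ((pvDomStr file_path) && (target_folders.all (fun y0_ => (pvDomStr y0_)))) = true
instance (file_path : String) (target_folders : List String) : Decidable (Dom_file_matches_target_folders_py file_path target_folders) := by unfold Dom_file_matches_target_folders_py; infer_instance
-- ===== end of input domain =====

-- B scans the normalized path once, testing each slash-cut prefix (and the whole path)
-- for membership in target_folders, instead of A's per-target equality/startswith scan
-- over target_folders; objective: alternative decomposition, same result.

-- ===== PORT A =====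
def file_matches_target_folders_py (file_path : String) (target_folders : List String) : Bool :=
  if target_folders.isEmpty then true
  else
    let normalized_path := PySem.Str.stripChars file_path "/"
    target_folders.any (fun target_folder =>
      normalized_path == target_folder ||
      PySem.Str.startswith normalized_path (target_folder ++ "/"))

-- ===== PORT B =====
-- the loop 'for i, c in enumerate(p): if c == "/" and p[:i] in target_folders: return True'
-- followed by the final 'return p in target_folders'
def fmtf_loop (target_folders : List String) (p : List Char) : List (Int × Char) → Bool
  | [] => target_folders.contains (String.ofList p)
  | ic :: rest =>
      if ic.2 == '/' && target_folders.contains (String.ofList (PySem.List.slice p none (some ic.1))) then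
        true
      else fmtf_loop target_folders p rest

def file_matches_target_folders_py_alt (file_path : String) (target_folders : List String) : Bool :=
  if target_folders.isEmpty then true
  else
    let p := (PySem.Str.stripChars file_path "/").toList
    fmtf_loop target_folders p (PySem.List.enumerate p 0)

-- ===== PRECONDITION & SPEC =====
def Spec_file_matches_target_folders_py (file_path : String) (target_folders : List String) (out : Bool) : Prop := out = file_matches_target_folders_py_alt file_path target_folders
instance (file_path : String) (target_folders : List String) (out : Bool) : Decidable (Spec_file_matches_target_folders_py file_path target_folders out) := by unfold Spec_file_matches_target_folders_py; infer_instance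

-- ===== CLAIM (what is proved, stated in full; the proofs are below) =====
def Claim_equal_file_matches_target_folders_py : Prop := ∀ (file_path : String) (target_folders : List String), Dom_file_matches_target_folders_py file_path target_folders → Spec_file_matches_target_folders_py file_path target_folders (file_matches_target_folders_py file_path target_folders)

-- ===== LEMMAS AND PROOFS =====

-- B's loop is an 'any' over the enumerated pairs, followed by the final membership test
lemma fmtf_loop_eq (targets : List String) (p : List Char) (l : List (Int × Char)) :
    fmtf_loop targets p l =
      (l.any (fun ic => ic.2 == '/' && targets.contains (String.ofList (PySem.List.slice p none (some ic.1))))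
        || targets.contains (String.ofList p)) := by
  induction l with
  | nil => simp [fmtf_loop]
  | cons ic rest ih =>
      simp only [fmtf_loop, List.any_cons]
      cases h : (ic.2 == '/' && targets.contains (String.ofList (PySem.List.slice p none (some ic.1)))) <;>
        simp [ih]

-- a list has prefix t ++ ['/'] iff some slash in it cuts off exactly t
lemma prefix_slash_iff (t p : List Char) :
    (t ++ ['/'] <+: p) ↔ ∃ k, ∃ h : k < p.length, p[k] = '/' ∧ p.take k = t := by
  constructor
  · rintro ⟨rest, hr⟩
    subst hr
    exact ⟨t.length, by simp, by simp, by simp⟩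
  · rintro ⟨k, h, hc, ht⟩
    refine ⟨p.drop (k + 1), ?_⟩
    have h2 : p = p.take k ++ p[k] :: p.drop (k + 1) := by
      rw [List.getElem_cons_drop, List.take_append_drop]
    rw [ht, hc] at h2
    simpa using h2.symm

-- what B's loop decides, as a proposition over the character list
lemma B_iff (targets : List String) (p : List Char) :
    fmtf_loop targets p (PySem.List.enumerate p 0) = true ↔
      ((∃ k, ∃ _ : k < p.length, p[k] = '/' ∧ String.ofList (p.take k) ∈ targets)
        ∨ String.ofList p ∈ targets) := by
  rw [fmtf_loop_eq]
  simp only [Bool.or_eq_true, List.any_eq_true, PySem.List.mem_enumerate_iff,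
    Bool.and_eq_true, beq_iff_eq, List.contains_iff_mem]
  constructor
  · rintro (⟨ic, ⟨k, hk, hik⟩, hc, hmem⟩ | hmem)
    · subst hik
      left
      refine ⟨k, hk, hc, ?_⟩
      have hs : PySem.List.slice p none (some ((0 : Int) + (k : Int))) = p.take k := by
        simpa using PySem.List.slice_to_natCast (xs := p) (b := k)
      rwa [hs] at hmem
    · exact Or.inr hmem
  · rintro (⟨k, hk, hc, hmem⟩ | hmem)
    · left
      refine ⟨((0 : Int) + (k : Int), p[k]), ⟨k, hk, rfl⟩, hc, ?_⟩
      have hs : PySem.List.slice p none (some ((0 : Int) + (k : Int))) = p.take k := by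
        simpa using PySem.List.slice_to_natCast (xs := p) (b := k)
      rwa [hs]
    · exact Or.inr hmem

-- what A's 'any' decides, as a proposition
lemma A_iff (np : String) (targets : List String) :
    (targets.any (fun t => np == t || PySem.Str.startswith np (t ++ "/"))) = true ↔
      ∃ t ∈ targets, np = t ∨ t.toList ++ ['/'] <+: np.toList := by
  simp only [List.any_eq_true, Bool.or_eq_true, beq_iff_eq, PySem.Str.startswith_eq,
    PySem.Chars.startswith_iff, String.toList_append]
  constructor
  · rintro ⟨t, hmem, ht⟩
    refine ⟨t, hmem, ?_⟩
    rcases ht with ht | ht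
    · exact Or.inl ht
    · right; simpa using ht
  · rintro ⟨t, hmem, ht⟩
    refine ⟨t, hmem, ?_⟩
    rcases ht with ht | ht
    · exact Or.inl ht
    · right; simpa using ht

theorem file_matches_target_folders_py_eq (file_path : String) (target_folders : List String) :
    file_matches_target_folders_py file_path target_folders
      = file_matches_target_folders_py_alt file_path target_folders := by
  unfold file_matches_target_folders_py file_matches_target_folders_py_alt
  by_cases hemp : target_folders.isEmpty
  · simp [hemp]
  · simp only [hemp, Bool.false_eq_true, if_false]
    set np := PySem.Str.stripChars file_path "/"
    apply Bool.eq_iff_iff.mpr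
    rw [A_iff, B_iff]
    constructor
    · rintro ⟨t, hmem, ht | ht⟩
      · right; rw [ht]; simpa using hmem
      · left
        rcases (prefix_slash_iff _ _).mp ht with ⟨k, hk, hc, htk⟩
        exact ⟨k, hk, hc, by rw [htk]; simpa using hmem⟩
    · rintro (⟨k, hk, hc, hmem⟩ | hmem)
      · refine ⟨String.ofList (np.toList.take k), hmem, Or.inr ?_⟩
        exact (prefix_slash_iff _ _).mpr ⟨k, hk, hc, by simp⟩
      · exact ⟨String.ofList np.toList, hmem, Or.inl (by simp)⟩

-- ===== VERDICT (by name: the statement is the Claim_ definition above) =====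
theorem file_matches_target_folders_py_spec : Claim_equal_file_matches_target_folders_py := by
  intro file_path target_folders _
  exact file_matches_target_folders_py_eq file_path target_folders
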